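-- pv_equiv track=rewrite | github.com/Iamfeifei/- | 打印机.py | check
-- ===== SOURCE A (Python) =====
-- def check(nums):
--     count = 0
--     for i in range(len(nums)):
--         item = nums[i]
--         if nums.count(item)==1:
--             count+=1
--         else:
--             nums[i] = 1 + item
--     if count == len(nums):
--         return nums
--     else:
--         return check(nums)
-- ===== SOURCE B (Python) =====
-- def check(nums):
--     # incrementally maintained frequency dict replaces the O(n) nums.count scan;
--     # mutates nums in place like the original
--     while True:
--         cnt = {}
--         for x in nums:
--             cnt[x] = cnt.get(x, 0) + 1
--         changed = False
--         for i in range(len(nums)):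
--             item = nums[i]
--             if cnt.get(item, 0) == 1:
--                 continue
--             nums[i] = item + 1
--             cnt[item] = cnt[item] - 1
--             cnt[item + 1] = cnt.get(item + 1, 0) + 1
--             changed = True
--         if not changed:
--             return nums
-- ===== Notes on version B (the rewrite author's own statement) =====
-- stated objective: faster
-- what changed: B replaces A's tail-recursive self-call and its O(n) nums.count(item) inner scan by an explicit while-loop whose pass maintains a frequency dict updated incrementally at every in-place write, so each pass is O(n) instead of O(n^2).
import Mathlib
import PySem

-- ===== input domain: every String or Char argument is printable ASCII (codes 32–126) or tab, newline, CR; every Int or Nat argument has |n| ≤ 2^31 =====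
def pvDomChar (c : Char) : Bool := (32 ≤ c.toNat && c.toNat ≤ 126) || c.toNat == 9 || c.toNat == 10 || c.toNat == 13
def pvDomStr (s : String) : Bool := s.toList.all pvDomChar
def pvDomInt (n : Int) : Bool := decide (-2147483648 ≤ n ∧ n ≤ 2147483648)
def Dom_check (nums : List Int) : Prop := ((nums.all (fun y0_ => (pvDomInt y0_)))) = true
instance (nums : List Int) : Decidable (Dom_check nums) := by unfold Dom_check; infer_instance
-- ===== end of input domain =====

-- B replaces A's O(n) `nums.count(item)` inner scan by a frequency dict maintained
-- incrementally across the in-place updates (objective: faster passes).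
-- Both A and B mutate `nums` in place in Python; the equivalence proved here is about
-- the return value. Both ports carry a Nat fuel (one unit per pass) as a totality
-- guard only; the bound is far larger than the passes any Dom input can need.

def pvFuelCheck (nums : List Int) : Nat := nums.length * (nums.length + 2 ^ 33) + 1

-- ===== PORT A =====
-- body of A's `for i in range(len(nums))` loop; state = (nums, count)
def checkPassStep (st : List Int × Int) (i : Int) : List Int × Int :=
  let item := PySem.List.pyGetD st.1 i 0          -- item = nums[i] (always in range)
  if PySem.List.count st.1 item == 1 then (st.1, st.2 + 1)
  else (PySem.List.pySetD st.1 i (1 + item), st.2)  -- nums[i] = 1 + item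

def checkGo : Nat → List Int → List Int
  | 0, l => l
  | fuel + 1, l =>
    let st := (PySem.List.pyRange 0 (l.length : Int) 1).foldl checkPassStep (l, 0)
    if st.2 == (st.1.length : Int) then st.1 else checkGo fuel st.1

def check (nums : List Int) : List Int := checkGo (pvFuelCheck nums) nums

-- ===== PORT B =====
-- body of B's inner loop; state = (nums, cnt, changed).  Source B's `cnt[item] = cnt[item] - 1`
-- (plain indexing, key always present) is ported as getD with default 0.
def checkAltStep (st : List Int × PySem.Dict Int Int × Bool) (i : Int) :
    List Int × PySem.Dict Int Int × Bool :=
  let item := PySem.List.pyGetD st.1 i 0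
  if st.2.1.getD item 0 == 1 then st
  else
    (PySem.List.pySetD st.1 i (item + 1),
     ((st.2.1.insert item (st.2.1.getD item 0 - 1)).insert (item + 1)
        (st.2.1.getD (item + 1) 0 + 1)),
     true)

def checkAltGo : Nat → List Int → List Int
  | 0, l => l
  | fuel + 1, l =>
    let cnt := l.foldl (fun d x => d.insert x (d.getD x 0 + 1)) PySem.Dict.empty
    let st := (PySem.List.pyRange 0 (l.length : Int) 1).foldl checkAltStep (l, cnt, false)
    if !st.2.2 then st.1 else checkAltGo fuel st.1

def check_alt (nums : List Int) : List Int := checkAltGo (pvFuelCheck nums) nums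

-- ===== PRECONDITION & SPEC =====
def Spec_check (nums : List Int) (out : List Int) : Prop := out = check_alt nums
instance (nums : List Int) (out : List Int) : Decidable (Spec_check nums out) := by unfold Spec_check; infer_instance

-- ===== CLAIM (what is proved, stated in full; the proofs are below) =====
def Claim_equal_check : Prop := ∀ (nums : List Int), Dom_check nums → Spec_check nums (check nums)

-- ===== LEMMAS AND PROOFS =====

lemma count_set_add (l : List Int) (n : Nat) (h : n < l.length) (v w : Int) :
    (l.set n v).count w + (if l[n] = w then 1 else 0)
      = l.count w + (if v = w then 1 else 0) := by
  have hl : l.take n ++ l[n] :: l.drop (n + 1) = l := by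
    rw [List.getElem_cons_drop, List.take_append_drop]
  rw [List.set_eq_take_cons_drop v h]
  conv_rhs => rw [← hl]
  simp only [List.count_append, List.count_cons]
  by_cases h1 : l[n] = w <;> by_cases h2 : v = w <;> simp [h1, h2] <;> omega

lemma pass_rel (idxs : List Int) :
    ∀ (l : List Int) (c : Int) (cnt : PySem.Dict Int Int) (ch : Bool),
    (∀ i ∈ idxs, 0 ≤ i ∧ i < (l.length : Int)) →
    (∀ v, cnt.getD v 0 = (l.count v : Int)) →
    (idxs.foldl checkAltStep (l, cnt, ch)).1 = (idxs.foldl checkPassStep (l, c)).1 ∧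
    (idxs.foldl checkPassStep (l, c)).1.length = l.length ∧
    (∀ v, (idxs.foldl checkAltStep (l, cnt, ch)).2.1.getD v 0
            = ((idxs.foldl checkPassStep (l, c)).1.count v : Int)) ∧
    (idxs.foldl checkPassStep (l, c)).2 ≤ c + idxs.length ∧
    (idxs.foldl checkAltStep (l, cnt, ch)).2.2
      = (ch || decide ((idxs.foldl checkPassStep (l, c)).2 < c + (idxs.length : Int))) := by
  induction idxs with
  | nil =>
    intro l c cnt ch _ hcnt
    refine ⟨rfl, rfl, hcnt, by simp, by simp⟩
  | cons i idxs ih =>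
    intro l c cnt ch hb hcnt
    obtain ⟨hi0, hilt⟩ := hb i (by simp)
    have hidx : i.toNat < l.length := by omega
    have hget : PySem.List.pyGetD l i 0 = l[i.toNat] :=
      PySem.List.pyGetD_eq_getElem l 0 hi0 hilt
    have hset : ∀ v : Int, PySem.List.pySetD l i v = l.set i.toNat v := by
      intro v
      rw [← Int.toNat_of_nonneg hi0, PySem.List.pySetD_natCast]
      congr 1
    set item := l[i.toNat] with hitem
    by_cases hc : List.count item l = 1
    · -- unique branch: both states keep the list; A increments count
      have hA : checkPassStep (l, c) i = (l, c + 1) := by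
        simp [checkPassStep, hget, PySem.List.count, hc]
      have hB : checkAltStep (l, cnt, ch) i = (l, cnt, ch) := by
        simp [checkAltStep, hget, hcnt, hc]
      simp only [List.foldl_cons, hA, hB]
      obtain ⟨e1, e2, e3, e4, e5⟩ := ih l (c + 1) cnt ch
        (fun j hj => hb j (by simp [hj])) hcnt
      refine ⟨e1, e2, e3, ?_, ?_⟩
      · simp only [List.length_cons]
        push_cast at e4 ⊢
        omega
      · simp only [List.length_cons]
        rw [e5]
        congr 1
        rw [decide_eq_decide]
        push_cast
        constructor <;> intro <;> omega
    · -- duplicate branch: both set nums[i] := item+1; B updates cnt and sets changed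
      have hA : checkPassStep (l, c) i = (l.set i.toNat (1 + item), c) := by
        simp [checkPassStep, hget, PySem.List.count, hc, hset]
      set cnt' := ((cnt.insert item (cnt.getD item 0 - 1)).insert (item + 1)
          (cnt.getD (item + 1) 0 + 1)) with hcnt'
      have hB : checkAltStep (l, cnt, ch) i = (l.set i.toNat (item + 1), cnt', true) := by
        simp [checkAltStep, hget, hcnt, hc, hset, hcnt']
      have hcomm : l.set i.toNat (1 + item) = l.set i.toNat (item + 1) := by rw [add_comm]
      have hlen' : (l.set i.toNat (item + 1)).length = l.length := by simp
      have hcnt'' : ∀ v, cnt'.getD v 0 = ((l.set i.toNat (item + 1)).count v : Int) := by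
        intro v
        have hcs := count_set_add l i.toNat hidx (item + 1) v
        rw [← hitem] at hcs
        rw [hcnt', PySem.Dict.getD_insert, PySem.Dict.getD_insert]
        by_cases hv1 : v = item + 1
        · subst hv1
          rw [if_pos rfl, hcnt]
          split_ifs at hcs <;> push_cast at hcs ⊢ <;> omega
        · rw [if_neg hv1]
          by_cases hv2 : v = item
          · subst hv2
            rw [if_pos rfl, hcnt]
            split_ifs at hcs <;> push_cast at hcs ⊢ <;> omega
          · rw [if_neg hv2, hcnt]
            split_ifs at hcs <;> push_cast at hcs ⊢ <;> omega
      simp only [List.foldl_cons, hA, hB, hcomm]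
      obtain ⟨e1, e2, e3, e4, e5⟩ := ih (l.set i.toNat (item + 1)) c cnt' true
        (fun j hj => by rw [hlen']; exact hb j (by simp [hj])) hcnt''
      refine ⟨e1, by rw [e2, hlen'], e3, ?_, ?_⟩
      · simp only [List.length_cons]
        push_cast at e4 ⊢
        omega
      · rw [e5]
        simp only [Bool.true_or, List.length_cons]
        symm
        simp only [Bool.or_eq_true, decide_eq_true_eq]
        right
        push_cast at e4 ⊢
        omega

lemma go_eq (fuel : Nat) : ∀ l : List Int, checkAltGo fuel l = checkGo fuel l := by
  induction fuel with
  | zero => intro l; rfl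
  | succ fuel ih =>
    intro l
    have hcnt : ∀ v, (l.foldl (fun d x => d.insert x (d.getD x 0 + 1))
        PySem.Dict.empty).getD v 0 = (l.count v : Int) := by
      intro v
      rw [PySem.Dict.getD_foldl_insert_add_one]
      simp [PySem.Dict.getD_empty]
    have hb : ∀ i ∈ PySem.List.pyRange 0 (l.length : Int) 1, 0 ≤ i ∧ i < (l.length : Int) := by
      intro i hi
      rw [PySem.List.mem_pyRange_one] at hi
      exact hi
    have hlenr : (PySem.List.pyRange 0 (l.length : Int) 1).length = l.length := by
      rw [PySem.List.pyRange_zero_natCast]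
      simp
    obtain ⟨e1, e2, e3, e4, e5⟩ :=
      pass_rel (PySem.List.pyRange 0 (l.length : Int) 1) l 0 _ false hb hcnt
    simp only [checkGo, checkAltGo]
    rw [e1, e5]
    set stA := (PySem.List.pyRange 0 (l.length : Int) 1).foldl checkPassStep (l, 0) with hstA
    rw [hlenr] at e4 e5 ⊢
    rw [e2]
    by_cases hEnd : stA.2 = (l.length : Int)
    · have hlt : ¬ (stA.2 < (l.length : Int)) := by omega
      simp [hEnd]
    · have hlt : stA.2 < (l.length : Int) := by omega
      simp [hEnd, hlt, ih]

-- ===== VERDICT (by name: the statement is the Claim_ definition above) =====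
theorem check_spec : Claim_equal_check := by
  intro nums _
  unfold Spec_check check check_alt
  rw [go_eq]
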